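-- pv_equiv track=rewrite | github.com/LoganKloft/aoc2024 | day_5/part2.py | check_manual
-- ===== SOURCE A (Python) =====
-- def check_manual(manual, rules):
--     seen = set()
--     for page_idx in range(len(manual)):
--         page = manual[page_idx]
--         if page in rules:
--             rule = rules[page]
--             for rule_page in rule:
--                 if rule_page in seen:
--                     return page_idx
--
--         seen.add(page)
--
--     return -1
-- ===== SOURCE B (Python) =====
-- def check_manual(manual, rules):
--     n = len(manual)
--     first_occ = {}
--     for j, page in enumerate(manual):
--         if page not in first_occ:
--             first_occ[page] = j
--     for i, page in enumerate(manual):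
--         if page in rules:
--             for rule_page in rules[page]:
--                 if first_occ.get(rule_page, n) < i:
--                     return i
--     return -1
-- ===== Notes on version B (the rewrite author's own statement) =====
-- stated objective: alternative
-- what changed: Replaces A's incrementally maintained seen-set (grown page by page, membership-tested inside the scan) with a first-occurrence index table built in one upfront pass, followed by a scan that compares stored first-occurrence indices against the current index.
import Mathlib
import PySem

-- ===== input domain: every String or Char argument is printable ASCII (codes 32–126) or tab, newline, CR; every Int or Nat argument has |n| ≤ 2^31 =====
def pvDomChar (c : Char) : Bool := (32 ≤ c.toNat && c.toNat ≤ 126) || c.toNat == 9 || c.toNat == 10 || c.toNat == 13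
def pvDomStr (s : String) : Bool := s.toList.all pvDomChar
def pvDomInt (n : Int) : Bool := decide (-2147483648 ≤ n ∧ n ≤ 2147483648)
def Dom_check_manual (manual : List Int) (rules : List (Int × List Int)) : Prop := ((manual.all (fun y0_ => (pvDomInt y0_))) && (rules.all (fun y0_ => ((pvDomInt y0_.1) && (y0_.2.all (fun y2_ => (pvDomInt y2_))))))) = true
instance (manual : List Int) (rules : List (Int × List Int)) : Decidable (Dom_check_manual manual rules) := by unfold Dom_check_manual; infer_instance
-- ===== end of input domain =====

-- B replaces A's incrementally maintained seen-set by an upfront first-occurrence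
-- index table built in one pass, then scans comparing indices (objective: alternative).

-- ===== PORT A =====
-- the for-loop over range(len(manual)) with the growing 'seen' set and early return
def pvALoop (rules : PySem.Dict Int (List Int)) (pages : List Int) (pageIdx : Int)
    (seen : PySem.Set Int) : Int :=
  match pages with
  | [] => -1
  | page :: rest =>
    match rules.get? page with
    | some rule =>
      if rule.any (fun rulePage => PySem.Set.contains seen rulePage) then pageIdx
      else pvALoop rules rest (pageIdx + 1) (PySem.Set.add seen page)
    | none => pvALoop rules rest (pageIdx + 1) (PySem.Set.add seen page)

def check_manual (manual : List Int) (rules : List (Int × List Int)) : Int :=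
  pvALoop (PySem.Dict.ofList rules) manual 0 PySem.Set.empty

-- ===== PORT B =====
-- first_occ: one forward pass, store index only when key absent
def pvFirstOcc (manual : List Int) : PySem.Dict Int Int :=
  (PySem.List.enumerate manual 0).foldl
    (fun d p => if d.contains p.2 then d else d.insert p.2 p.1) PySem.Dict.empty

-- second pass over enumerate(manual): return i on first index comparison hit
def pvBScan (rules : PySem.Dict Int (List Int)) (fo : PySem.Dict Int Int) (n : Int) :
    List (Int × Int) → Int
  | [] => -1
  | (i, page) :: rest =>
    match rules.get? page with
    | some rule =>
      if rule.any (fun rulePage => fo.getD rulePage n < i) then i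
      else pvBScan rules fo n rest
    | none => pvBScan rules fo n rest

def check_manual_alt (manual : List Int) (rules : List (Int × List Int)) : Int :=
  pvBScan (PySem.Dict.ofList rules) (pvFirstOcc manual) (manual.length : Int)
    (PySem.List.enumerate manual 0)

-- ===== PRECONDITION & SPEC =====
def Spec_check_manual (manual : List Int) (rules : List (Int × List Int)) (out : Int) : Prop := out = check_manual_alt manual rules
instance (manual : List Int) (rules : List (Int × List Int)) (out : Int) : Decidable (Spec_check_manual manual rules out) := by unfold Spec_check_manual; infer_instance

-- ===== CLAIM (what is proved, stated in full; the proofs are below) =====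
def Claim_equal_check_manual : Prop := ∀ (manual : List Int) (rules : List (Int × List Int)), Dom_check_manual manual rules → Spec_check_manual manual rules (check_manual manual rules)

-- ===== LEMMAS AND PROOFS =====

-- the fold building first_occ, characterised via findIdx?
theorem pvFO_fold (xs : List Int) (k : Int) (d : PySem.Dict Int Int) (x : Int) :
    ((PySem.List.enumerate xs k).foldl
      (fun d p => if d.contains p.2 then d else d.insert p.2 p.1) d).get? x =
    match d.get? x with
    | some v => some v
    | none => (xs.findIdx? (fun y => y == x)).map (fun j : Nat => k + (j : Int)) := by
  induction xs generalizing k d with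
  | nil => simp [PySem.List.enumerate]; cases d.get? x <;> simp
  | cons y ys ih =>
    rw [PySem.List.enumerate_cons, List.foldl_cons]
    by_cases hc : d.contains y = true
    · rw [if_pos hc, ih]
      cases hdy : d.get? x with
      | some v => simp
      | none =>
        by_cases hxy : y = x
        · subst hxy
          rw [PySem.Dict.contains_eq_isSome_get?, hdy] at hc; simp at hc
        · have hb : (y == x) = false := by simp [hxy]
          simp only [List.findIdx?_cons, hb]
          cases hfi : ys.findIdx? (fun y => y == x) <;> simp <;> ring
    · rw [if_neg hc, ih]
      by_cases hxy : y = x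
      · subst hxy
        rw [PySem.Dict.contains_eq_isSome_get?] at hc
        cases hdy : d.get? y with
        | some v => rw [hdy] at hc; simp at hc
        | none =>
          rw [PySem.Dict.get?_insert_self]
          simp [List.findIdx?_cons]
      · rw [PySem.Dict.get?_insert_of_ne _ _ (by exact fun h => hxy h.symm)]
        cases hdy : d.get? x with
        | some v => simp
        | none =>
          have hb : (y == x) = false := by simp [hxy]
          simp only [List.findIdx?_cons, hb]
          cases hfi : ys.findIdx? (fun y => y == x) <;> simp <;> ring

theorem pvFO_get? (manual : List Int) (x : Int) :
    (pvFirstOcc manual).get? x =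
      (manual.findIdx? (fun y => y == x)).map (fun j : Nat => (j : Int)) := by
  unfold pvFirstOcc
  rw [pvFO_fold]
  rw [show (PySem.Dict.empty : PySem.Dict Int Int).get? x = none from rfl]
  simp

-- first_occ.get(rp, n) < k  iff  rp occurs in the first k pages (for k < n = |manual|)
theorem pvFO_lt_iff (manual : List Int) (x : Int) (k : Nat) (hk : k < manual.length) :
    ((pvFirstOcc manual).getD x (manual.length : Int) < (k : Int)) ↔ x ∈ manual.take k := by
  rw [PySem.Dict.getD_eq_get?_getD, pvFO_get?]
  cases hfi : manual.findIdx? (fun y => y == x) with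
  | none =>
    rw [List.findIdx?_eq_none_iff] at hfi
    simp only [Option.map_none, Option.getD_none]
    constructor
    · intro h; omega
    · intro hmem
      have hx := hfi x (List.mem_of_mem_take hmem)
      simp at hx
  | some j =>
    simp only [Option.map_some, Option.getD_some, Nat.cast_lt]
    rw [List.findIdx?_eq_some_iff_getElem] at hfi
    obtain ⟨hj, hpj, hmin⟩ := hfi
    constructor
    · intro hjk
      have : manual[j] ∈ manual.take k := by
        rw [List.mem_take_iff_getElem]
        exact ⟨j, by omega, rfl⟩
      simpa [show manual[j] = x by simpa using hpj] using this
    · intro hmem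
      rw [List.mem_take_iff_getElem] at hmem
      obtain ⟨i, hi, hix⟩ := hmem
      by_contra hjk
      have hij : i < j := by omega
      have := hmin i hij
      simp [hix.symm] at this

-- seen = set of the first k pages
theorem pvSeen_take (l : List Int) (x : Int) :
    PySem.Set.contains (PySem.Set.ofList l) x = decide (x ∈ l) := by
  simp [PySem.Set.contains_eq_listContains, PySem.Set.mem_ofList]

-- lockstep equivalence of the two loops
theorem pvLoop_eq (rules : PySem.Dict Int (List Int)) (manual : List Int) :
    ∀ (suf : List Int) (k : Nat), manual.take k ++ suf = manual →
      pvALoop rules suf (k : Int) (PySem.Set.ofList (manual.take k)) =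
      pvBScan rules (pvFirstOcc manual) (manual.length : Int)
        (PySem.List.enumerate suf (k : Int)) := by
  intro suf
  induction suf with
  | nil => intro k _; simp [pvALoop, pvBScan, PySem.List.enumerate]
  | cons page rest ih =>
    intro k hpre
    have hlen := congrArg List.length hpre
    simp [List.length_take] at hlen
    have hk : k < manual.length := by omega
    have htklen : (manual.take k).length = k := by simp [List.length_take]; omega
    have hgetk : manual[k]? = some page := by
      conv_lhs => rw [← hpre]
      rw [List.getElem?_append_right (by omega)]
      simp [htklen]
    have hcond : ∀ rule : List Int,
        rule.any (fun rp => PySem.Set.contains (PySem.Set.ofList (manual.take k)) rp) =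
        rule.any (fun rp => (pvFirstOcc manual).getD rp (manual.length : Int) < (k : Int)) := by
      intro rule
      refine List.any_congr rfl (fun rp => ?_)
      rw [pvSeen_take]
      rw [show (decide (rp ∈ manual.take k)) =
          decide ((pvFirstOcc manual).getD rp (manual.length : Int) < (k : Int)) from
        by simp [pvFO_lt_iff manual rp k hk]]
    have hnext : manual.take (k + 1) ++ rest = manual := by
      rw [List.take_add_one, hgetk]
      simpa using hpre
    have hadd : PySem.Set.add (PySem.Set.ofList (manual.take k)) page =
        PySem.Set.ofList (manual.take (k + 1)) := by
      rw [List.take_add_one, hgetk]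
      simp [PySem.Set.ofList_append_singleton]
    have hrec := ih (k + 1) hnext
    rw [PySem.List.enumerate_cons]
    show pvALoop rules (page :: rest) (k : Int) (PySem.Set.ofList (manual.take k)) =
      pvBScan rules (pvFirstOcc manual) (manual.length : Int)
        (((k : Int), page) :: PySem.List.enumerate rest ((k : Int) + 1))
    unfold pvALoop pvBScan
    cases hr : rules.get? page with
    | none =>
      simp only []
      rw [hadd, show (k : Int) + 1 = ((k + 1 : Nat) : Int) by push_cast; ring, hrec]
    | some rule =>
      simp only []
      rw [hcond rule]
      by_cases hb : rule.any (fun rp => (pvFirstOcc manual).getD rp (manual.length : Int) < (k : Int)) = true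
      · simp [hb]
      · simp only [Bool.not_eq_true] at hb
        simp only [hb]
        rw [hadd, show (k : Int) + 1 = ((k + 1 : Nat) : Int) by push_cast; ring, hrec]

-- ===== VERDICT (by name: the statement is the Claim_ definition above) =====
theorem check_manual_spec : Claim_equal_check_manual := by
  intro manual rules _
  unfold Spec_check_manual check_manual check_manual_alt
  have := pvLoop_eq (PySem.Dict.ofList rules) manual manual 0 (by simp)
  simpa [PySem.Set.empty] using this
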